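-- pv_equiv track=rewrite | github.com/bakwc/JamSpell | evaluate/utils.py | generateSentences
-- ===== SOURCE A (Python) =====
-- def generateSentences(words):
--     sentences = []
--     currSent = []
--     for w in words:
--         if w == '.':
--             if currSent:
--                 sentences.append(currSent)
--             currSent = []
--         else:
--             currSent.append(w)
--     if currSent:
--         sentences.append(currSent)
--     return sentences
-- ===== SOURCE B (Python) =====
-- def generateSentences(words):
--     # run-scanner: walk runs of the predicate (w == '.'), skip period runs,
--     # emit each maximal run of non-period words as one sentence slice
--     res = []
--     i, n = 0, len(words)
--     while i < n:
--         if words[i] == '.':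
--             i += 1
--             while i < n and words[i] == '.':
--                 i += 1
--         else:
--             j = i + 1
--             while j < n and words[j] != '.':
--                 j += 1
--             res.append(words[i:j])
--             i = j
--     return res
-- ===== Notes on version B (the rewrite author's own statement) =====
-- stated objective: alternative
-- what changed: Replaces the element-by-element running-buffer accumulator (with its explicit empty-buffer checks) by a two-pointer run scanner that skips maximal runs of periods and emits each maximal run of non-period words as a slice.
import Mathlib
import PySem

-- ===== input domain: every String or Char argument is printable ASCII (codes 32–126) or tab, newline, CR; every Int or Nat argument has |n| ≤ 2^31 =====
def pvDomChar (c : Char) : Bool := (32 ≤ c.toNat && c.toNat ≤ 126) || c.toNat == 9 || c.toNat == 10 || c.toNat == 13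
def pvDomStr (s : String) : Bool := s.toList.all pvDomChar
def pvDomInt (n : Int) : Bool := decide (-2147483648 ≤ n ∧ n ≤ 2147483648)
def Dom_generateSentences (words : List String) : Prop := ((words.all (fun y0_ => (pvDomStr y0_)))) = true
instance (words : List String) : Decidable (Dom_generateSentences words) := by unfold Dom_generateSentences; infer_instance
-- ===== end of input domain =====

-- B replaces A's running-buffer accumulator by a run scanner over maximal '.'/non-'.' runs (alternative decomposition, same cost).

-- ===== PORT A =====
-- the for-loop of A, with state (sentences, currSent)
def genSentLoopA (sentences : List (List String)) (currSent : List String) :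
    List String → List (List String) × List String
  | [] => (sentences, currSent)
  | w :: ws =>
      if w == "." then
        genSentLoopA (if currSent.isEmpty then sentences else sentences ++ [currSent]) [] ws
      else
        genSentLoopA sentences (currSent ++ [w]) ws

def generateSentences (words : List String) : List (List String) :=
  let (sentences, currSent) := genSentLoopA [] [] words
  if currSent.isEmpty then sentences else sentences ++ [currSent]

-- ===== PORT B =====
-- run scanner: words[i:j] slices become takeWhile, advancing i to j becomes dropWhile
def genSentRuns : List String → List (List String)
  | [] => []
  | w :: ws =>
      if w == "." then
        genSentRuns (ws.dropWhile (fun x => x == "."))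
      else
        (w :: ws.takeWhile (fun x => x != ".")) :: genSentRuns (ws.dropWhile (fun x => x != "."))
termination_by ws => ws.length
decreasing_by
  · exact Nat.lt_succ_of_le (List.length_dropWhile_le _ _)
  · exact Nat.lt_succ_of_le (List.length_dropWhile_le _ _)

def generateSentences_alt (words : List String) : List (List String) := genSentRuns words

-- ===== PRECONDITION & SPEC =====
def Spec_generateSentences (words : List String) (out : List (List String)) : Prop := out = generateSentences_alt words
instance (words : List String) (out : List (List String)) : Decidable (Spec_generateSentences words out) := by unfold Spec_generateSentences; infer_instance

-- ===== CLAIM (what is proved, stated in full; the proofs are below) =====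
def Claim_equal_generateSentences : Prop := ∀ (words : List String), Dom_generateSentences words → Spec_generateSentences words (generateSentences words)

-- ===== LEMMAS AND PROOFS =====

-- skipping a leading run of periods does not change the result
theorem genSentRuns_dropPeriods (ws : List String) :
    genSentRuns (ws.dropWhile (fun x => x == ".")) = genSentRuns ws := by
  induction ws with
  | nil => simp [List.dropWhile]
  | cons x t ih =>
      by_cases hx : x = "."
      · subst hx
        rw [show genSentRuns ("." :: t) = genSentRuns (t.dropWhile (fun x => x == ".")) from by
              simp [genSentRuns]]
        simp [List.dropWhile, ih]
      · have hbeq : (x == ".") = false := by simp [hx]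
        simp [List.dropWhile, hbeq]

-- main invariant: A's loop finished off equals sents ++ the run-scanner result with pending buffer cs
theorem genSentLoopA_eq (words : List String) :
    ∀ (sents : List (List String)) (cs : List String),
      (if (genSentLoopA sents cs words).2.isEmpty then (genSentLoopA sents cs words).1
       else (genSentLoopA sents cs words).1 ++ [(genSentLoopA sents cs words).2]) =
      sents ++ (if cs.isEmpty then genSentRuns words
                else (cs ++ words.takeWhile (fun x => x != ".")) ::
                     genSentRuns (words.dropWhile (fun x => x != "."))) := by
  induction words with
  | nil =>
      intro sents cs
      cases cs with
      | nil => simp [genSentLoopA, genSentRuns]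
      | cons c cs' => simp [genSentLoopA, genSentRuns]
  | cons w ws ih =>
      intro sents cs
      by_cases hw : w = "."
      · subst hw
        have hper : genSentRuns ("." :: ws) = genSentRuns ws := by
          rw [show genSentRuns ("." :: ws) = genSentRuns (ws.dropWhile (fun x => x == ".")) from by
                simp [genSentRuns]]
          exact genSentRuns_dropPeriods ws
        simp only [genSentLoopA, beq_self_eq_true, if_pos]
        rw [ih]
        cases cs with
        | nil => simp [hper]
        | cons c cs' => simp [hper, List.takeWhile, List.dropWhile]
      · have hbeq : (w == ".") = false := by simp [hw]
        have hne : (w != ".") = true := by simp [hw]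
        simp only [genSentLoopA, hbeq, Bool.false_eq_true, if_neg, not_false_iff]
        rw [ih]
        cases cs with
        | nil => simp [genSentRuns, hw]
        | cons c cs' => simp [List.takeWhile, List.dropWhile, hne]

-- ===== VERDICT (by name: the statement is the Claim_ definition above) =====
theorem generateSentences_spec : Claim_equal_generateSentences := by
  intro words _
  unfold Spec_generateSentences generateSentences generateSentences_alt
  have h := genSentLoopA_eq words [] []
  simpa using h
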